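-- pv_equiv track=rewrite | github.com/yeon-dong/Algorithm | 프로그래머스/0/181893. 배열 조각하기/배열 조각하기.py | solution
-- ===== SOURCE A (Python) =====
-- def solution(arr, query):
--     j=0
--     for i in query:
--         if j % 2 == 0:
--             arr = arr[:i+1]
--         else:
--             arr = arr[i:]
--         j+=1
--     return arr
-- ===== SOURCE B (Python) =====
-- def _clamp(n, s):
--     # Python slice-index normalisation against current length n
--     if s < 0:
--         s += n
--     if s < 0:
--         return 0
--     if s > n:
--         return n
--     return s
--
-- def solution(arr, query):
--     lo, hi = 0, len(arr)
--     j = 0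
--     for q in query:
--         n = hi - lo
--         s = _clamp(n, q + 1 if j % 2 == 0 else q)
--         if j % 2 == 0:
--             hi = lo + s
--         else:
--             lo = lo + s
--         j += 1
--     return arr[lo:hi]
-- ===== Notes on version B (the rewrite author's own statement) =====
-- stated objective: alternative
-- what changed: Instead of materialising a new list slice for every query, B tracks the current window as a pair of lo/hi indices (normalising each query index against the current window length exactly as Python slicing does) and performs a single slice at the end; it trades A's repeated list copying for index arithmetic per query.
import Mathlib
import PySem

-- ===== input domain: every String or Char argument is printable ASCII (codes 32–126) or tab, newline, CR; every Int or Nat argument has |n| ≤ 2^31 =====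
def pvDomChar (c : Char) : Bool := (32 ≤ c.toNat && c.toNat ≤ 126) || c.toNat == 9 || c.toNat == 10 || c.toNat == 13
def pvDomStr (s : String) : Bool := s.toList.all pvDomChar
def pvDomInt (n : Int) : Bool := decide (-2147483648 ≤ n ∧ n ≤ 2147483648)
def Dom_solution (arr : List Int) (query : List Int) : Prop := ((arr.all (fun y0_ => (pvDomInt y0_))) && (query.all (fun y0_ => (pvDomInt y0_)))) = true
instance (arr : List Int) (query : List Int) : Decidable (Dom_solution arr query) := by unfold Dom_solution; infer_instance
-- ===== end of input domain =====

-- B replaces A's repeated list slicing by lo/hi window-index tracking with one final slice (alternative algorithm; not measured faster).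

-- ===== PORT A =====
def stepA (st : List Int × Nat) (i : Int) : List Int × Nat :=
  if st.2 % 2 == 0 then (PySem.List.slice st.1 none (some (i + 1)), st.2 + 1)
  else (PySem.List.slice st.1 (some i) none, st.2 + 1)

def solution (arr : List Int) (query : List Int) : List Int :=
  (query.foldl stepA (arr, 0)).1

-- ===== PORT B =====
-- _clamp in Source B
def clampB (n s : Int) : Int :=
  let s := if s < 0 then s + n else s
  if s < 0 then 0 else if s > n then n else s

def stepB (st : Nat × Int × Int) (q : Int) : Nat × Int × Int :=
  let n := st.2.2 - st.2.1
  let s := clampB n (if st.1 % 2 == 0 then q + 1 else q)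
  if st.1 % 2 == 0 then (st.1 + 1, st.2.1, st.2.1 + s)
  else (st.1 + 1, st.2.1 + s, st.2.2)

def solution_alt (arr : List Int) (query : List Int) : List Int :=
  let st := query.foldl stepB (0, 0, (arr.length : Int))
  (arr.take st.2.2.toNat).drop st.2.1.toNat

-- ===== PRECONDITION & SPEC =====
def Spec_solution (arr : List Int) (query : List Int) (out : List Int) : Prop := out = solution_alt arr query
instance (arr : List Int) (query : List Int) (out : List Int) : Decidable (Spec_solution arr query out) := by unfold Spec_solution; infer_instance

-- ===== CLAIM (what is proved, stated in full; the proofs are below) =====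
def Claim_equal_solution : Prop := ∀ (arr : List Int) (query : List Int), Dom_solution arr query → Spec_solution arr query (solution arr query)

-- ===== LEMMAS AND PROOFS =====

lemma clampB_nonneg (n s : Int) (hn : 0 ≤ n) : 0 ≤ clampB n s := by
  simp only [clampB]; split_ifs <;> omega

lemma clampB_le (n s : Int) (hn : 0 ≤ n) : clampB n s ≤ n := by
  simp only [clampB]; split_ifs <;> omega

lemma clampIdx_eq_clampB (m : Nat) (t : Int) :
    PySem.List.clampIdx m t = (clampB (m : Int) t).toNat := by
  simp only [PySem.List.clampIdx, clampB]; split_ifs <;> omega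

lemma window_length (arr : List Int) (l h : Nat) (hh : h ≤ arr.length) :
    ((arr.take h).drop l).length = h - l := by
  simp; omega

lemma take_window (arr : List Int) (l h k : Nat) (hk : k ≤ h - l) :
    ((arr.take h).drop l).take k = (arr.take (l + k)).drop l := by
  rw [List.drop_take, List.drop_take, List.take_take]
  congr 1; omega

lemma key (query : List Int) : ∀ (arr : List Int) (j : Nat) (lo hi : Int),
    0 ≤ lo → lo ≤ hi → hi ≤ (arr.length : Int) →
    (query.foldl stepA ((arr.take hi.toNat).drop lo.toNat, j)).1 =
      (let st := query.foldl stepB (j, lo, hi)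
       (arr.take st.2.2.toNat).drop st.2.1.toNat) := by
  induction query with
  | nil => intro arr j lo hi _ _ _; rfl
  | cons q rest ih =>
    intro arr j lo hi h0 hlh hhl
    simp only [List.foldl_cons]
    have hlen : (((arr.take hi.toNat).drop lo.toNat).length : Int) = hi - lo := by
      rw [window_length arr lo.toNat hi.toNat (by omega)]; omega
    by_cases hj : j % 2 = 0
    · -- even step: arr = arr[:q+1]
      have hA : stepA ((arr.take hi.toNat).drop lo.toNat, j) q =
          (PySem.List.slice ((arr.take hi.toNat).drop lo.toNat) none (some (q + 1)), j + 1) := by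
        simp [stepA, hj]
      have hB : stepB (j, lo, hi) q = (j + 1, lo, lo + clampB (hi - lo) (q + 1)) := by
        simp [stepB, hj]
      rw [hA, hB]
      set s : Int := clampB (hi - lo) (q + 1) with hs
      have hs0 : 0 ≤ s := clampB_nonneg _ _ (by omega)
      have hsle : s ≤ hi - lo := clampB_le _ _ (by omega)
      have hlen' : ((arr.take hi.toNat).drop lo.toNat).length = hi.toNat - lo.toNat :=
        window_length arr lo.toNat hi.toNat (by omega)
      have hslice : PySem.List.slice ((arr.take hi.toNat).drop lo.toNat) none (some (q + 1)) =
          (arr.take (lo + s).toNat).drop lo.toNat := by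
        simp only [PySem.List.slice, clampIdx_eq_clampB, hlen', List.drop_zero, Nat.sub_zero]
        rw [show ((hi.toNat - lo.toNat : Nat) : Int) = hi - lo from by omega]
        rw [Int.toNat_add h0 hs0]
        exact take_window arr lo.toNat hi.toNat s.toNat (by omega)
      rw [hslice]
      exact ih arr (j + 1) lo (lo + s) h0 (by omega) (by omega)
    · -- odd step: arr = arr[q:]
      have hA : stepA ((arr.take hi.toNat).drop lo.toNat, j) q =
          (PySem.List.slice ((arr.take hi.toNat).drop lo.toNat) (some q) none, j + 1) := by
        simp [stepA, hj]
      have hB : stepB (j, lo, hi) q = (j + 1, lo + clampB (hi - lo) q, hi) := by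
        simp [stepB, hj]
      rw [hA, hB]
      set s : Int := clampB (hi - lo) q with hs
      have hs0 : 0 ≤ s := clampB_nonneg _ _ (by omega)
      have hsle : s ≤ hi - lo := clampB_le _ _ (by omega)
      have hlen' : ((arr.take hi.toNat).drop lo.toNat).length = hi.toNat - lo.toNat :=
        window_length arr lo.toNat hi.toNat (by omega)
      have hslice : PySem.List.slice ((arr.take hi.toNat).drop lo.toNat) (some q) none =
          (arr.take hi.toNat).drop (lo + s).toNat := by
        rw [PySem.List.slice_some_none, clampIdx_eq_clampB, hlen']
        rw [show ((hi.toNat - lo.toNat : Nat) : Int) = hi - lo from by omega,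
           List.drop_drop, Int.toNat_add h0 hs0]
      rw [hslice]
      exact ih arr (j + 1) (lo + s) hi (by omega) (by omega) hhl

-- ===== VERDICT (by name: the statement is the Claim_ definition above) =====
theorem solution_spec : Claim_equal_solution := by
  intro arr query _
  show solution arr query = solution_alt arr query
  unfold solution solution_alt
  have h := key query arr 0 0 (arr.length : Int) (by omega) (by omega) (by omega)
  simpa using h
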